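-- pv_equiv track=rewrite | github.com/mattheqd/columns | game_mechanics.py | _should_land
-- ===== SOURCE A (Python) =====
-- def _should_land(column: list[str]) -> bool:
--     'Determines if a faller should land'
--     if '   ' not in column:
--         return True
--     for i in range(1, len(column)):
--         if column[i] == '   ':
--             for j in range(i, -1, -1):
--                 if column[j] != '   ':
--                     return False
--     return True
-- ===== SOURCE B (Python) =====
-- def _should_land(column: list[str]) -> bool:
--     'Determines if a faller should land'
--     seen = False
--     for c in column:
--         if c != '   ':
--             seen = True
--         elif seen:
--             return False
--     return True
-- ===== Notes on version B (the rewrite author's own statement) =====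
-- stated objective: simpler
-- what changed: Replaced the membership pre-check and the nested index scans (for each empty cell, rescan all cells below it) with a single forward pass carrying one boolean flag 'seen a non-empty cell yet'.
import Mathlib
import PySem

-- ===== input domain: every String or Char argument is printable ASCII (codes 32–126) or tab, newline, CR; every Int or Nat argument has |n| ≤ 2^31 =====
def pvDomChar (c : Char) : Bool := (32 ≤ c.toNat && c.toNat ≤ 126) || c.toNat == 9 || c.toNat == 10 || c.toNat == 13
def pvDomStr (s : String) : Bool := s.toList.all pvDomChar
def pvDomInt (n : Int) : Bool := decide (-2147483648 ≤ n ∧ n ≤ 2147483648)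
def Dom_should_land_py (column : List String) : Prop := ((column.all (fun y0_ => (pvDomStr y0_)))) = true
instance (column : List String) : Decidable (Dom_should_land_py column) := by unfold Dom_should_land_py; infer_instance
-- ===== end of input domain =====

-- B replaces A's membership pre-check plus nested index scans by one forward pass with a
-- 'seen a non-empty cell' flag; same return value on every input (both are total).

-- ===== PORT A =====
-- inner loop: 'for j in range(i, -1, -1): if column[j] != "   ": return False'
-- (some false = early return; none = loop fell through)
def slpInner (column : List String) : List Int → Option Bool
  | [] => none
  | j :: js =>
    if PySem.List.pyGet? column j ≠ some "   " then some false
    else slpInner column js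

-- outer loop: 'for i in range(1, len(column)): if column[i] == "   ": <inner>'
def slpOuter (column : List String) : List Int → Bool
  | [] => true
  | i :: is =>
    if PySem.List.pyGet? column i = some "   " then
      match slpInner column (PySem.List.pyRange i (-1) (-1)) with
      | some b => b
      | none => slpOuter column is
    else slpOuter column is

def should_land_py (column : List String) : Bool :=
  if ¬ ("   " ∈ column) then true
  else slpOuter column (PySem.List.pyRange 1 (PySem.List.len column) 1)

-- ===== PORT B =====
-- one forward pass; 'seen' = a non-empty cell has already occurred
def slpAltLoop : List String → Bool → Bool
  | [], _ => true
  | c :: cs, seen =>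
    if c ≠ "   " then slpAltLoop cs true
    else if seen then false
    else slpAltLoop cs seen

def should_land_py_alt (column : List String) : Bool :=
  slpAltLoop column false

-- ===== PRECONDITION & SPEC =====
def Spec_should_land_py (column : List String) (out : Bool) : Prop := out = should_land_py_alt column
instance (column : List String) (out : Bool) : Decidable (Spec_should_land_py column out) := by unfold Spec_should_land_py; infer_instance

-- ===== CLAIM (what is proved, stated in full; the proofs are below) =====
def Claim_equal_should_land_py : Prop := ∀ (column : List String), Dom_should_land_py column → Spec_should_land_py column (should_land_py column)

-- ===== LEMMAS AND PROOFS =====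

-- The common spec: some non-empty cell occurs strictly below some empty cell.
def slpGap (column : List String) : Prop :=
  ∃ i j : Nat, j < i ∧ i < column.length ∧
    column.getD j "" ≠ "   " ∧ column.getD i "" = "   "

theorem slpAltLoop_true (cs : List String) :
    slpAltLoop cs true = !cs.contains "   " := by
  induction cs with
  | nil => rfl
  | cons c cs ih =>
    by_cases h : c = "   "
    · subst h; simp [slpAltLoop]
    · have hb : ("   " == c) = false := by
        rw [beq_eq_false_iff_ne]; exact fun e => h e.symm
      simp only [slpAltLoop, if_pos h, ih, List.contains_cons, hb, Bool.false_or]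

theorem slpAltLoop_false (cs : List String) :
    slpAltLoop cs false = false ↔ slpGap cs := by
  induction cs with
  | nil => simp [slpAltLoop, slpGap]
  | cons c cs ih =>
    by_cases h : c = "   "
    · subst h
      have e : slpAltLoop ("   " :: cs) false = slpAltLoop cs false := by
        simp [slpAltLoop]
      rw [e, ih]
      constructor
      · rintro ⟨i, j, hji, hi, hj, hie⟩
        exact ⟨i + 1, j + 1, by omega, by simpa using hi, by simpa using hj, by simpa using hie⟩
      · rintro ⟨i, j, hji, hi, hj, hie⟩
        match j, i with
        | 0, _ => simp at hj
        | j + 1, i + 1 =>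
          exact ⟨i, j, by omega, by simpa using hi, by simpa using hj, by simpa using hie⟩
    · have e : slpAltLoop (c :: cs) false = slpAltLoop cs true := by
        simp [slpAltLoop, h]
      rw [e, slpAltLoop_true]
      constructor
      · intro hc
        simp only [Bool.not_eq_false', List.contains_eq_mem, decide_eq_true_eq] at hc
        obtain ⟨k, hk, hke⟩ := List.mem_iff_getElem.mp hc
        exact ⟨k + 1, 0, by omega, by simpa using hk,
          by simpa using h, by simp [List.getD, hk, hke]⟩
      · rintro ⟨i, j, hji, hi, hj, hie⟩
        match i with
        | 0 => omega
        | i + 1 =>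
          simp only [List.length_cons, Nat.add_lt_add_iff_right] at hi
          simp only [List.getD_cons_succ] at hie
          simp only [Bool.not_eq_false', List.contains_eq_mem, decide_eq_true_eq]
          rw [List.getD_eq_getElem _ _ hi] at hie
          exact hie ▸ List.getElem_mem hi

theorem slpInner_none (column : List String) (js : List Int)
    (h : ∀ j ∈ js, PySem.List.pyGet? column j = some "   ") :
    slpInner column js = none := by
  induction js with
  | nil => rfl
  | cons j js ih =>
    have hj := h j (List.mem_cons_self ..)
    show (if PySem.List.pyGet? column j ≠ some "   " then some false
          else slpInner column js) = none
    rw [if_neg (not_not_intro hj)]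
    exact ih fun x hx => h x (List.mem_cons_of_mem _ hx)

theorem slpInner_some (column : List String) (js : List Int)
    (h : ∃ j ∈ js, PySem.List.pyGet? column j ≠ some "   ") :
    slpInner column js = some false := by
  induction js with
  | nil => simp at h
  | cons j js ih =>
    show (if PySem.List.pyGet? column j ≠ some "   " then some false
          else slpInner column js) = some false
    by_cases hj : PySem.List.pyGet? column j = some "   "
    · rw [if_neg (not_not_intro hj)]
      apply ih
      obtain ⟨x, hx, hxe⟩ := h
      rcases List.mem_cons.mp hx with rfl | hx
      · exact absurd hj hxe
      · exact ⟨x, hx, hxe⟩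
    · rw [if_pos hj]

theorem slpOuter_false (column : List String) (is : List Int) :
    slpOuter column is = false ↔
      ∃ i ∈ is, PySem.List.pyGet? column i = some "   " ∧
        ∃ j ∈ PySem.List.pyRange i (-1) (-1), PySem.List.pyGet? column j ≠ some "   " := by
  induction is with
  | nil => simp [slpOuter]
  | cons i is ih =>
    by_cases hi : PySem.List.pyGet? column i = some "   "
    · by_cases hin : ∃ j ∈ PySem.List.pyRange i (-1) (-1),
          PySem.List.pyGet? column j ≠ some "   "
      · have e : slpOuter column (i :: is) = false := by
          simp only [slpOuter, if_pos hi, slpInner_some column _ hin]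
        rw [e]
        exact ⟨fun _ => ⟨i, List.mem_cons_self .., hi, hin⟩, fun _ => rfl⟩
      · have hnone : slpInner column (PySem.List.pyRange i (-1) (-1)) = none :=
          slpInner_none _ _ (fun j hj => by
            by_contra hc; exact hin ⟨j, hj, hc⟩)
        have e : slpOuter column (i :: is) = slpOuter column is := by
          simp only [slpOuter, if_pos hi, hnone]
        rw [e, ih]
        constructor
        · rintro ⟨x, hx, hxp⟩; exact ⟨x, List.mem_cons_of_mem _ hx, hxp⟩
        · rintro ⟨x, hx, hxe, hxp⟩
          rcases List.mem_cons.mp hx with rfl | hx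
          · exact absurd hxp hin
          · exact ⟨x, hx, hxe, hxp⟩
    · have e : slpOuter column (i :: is) = slpOuter column is := by
        simp only [slpOuter, if_neg hi]
      rw [e, ih]
      constructor
      · rintro ⟨x, hx, hxp⟩; exact ⟨x, List.mem_cons_of_mem _ hx, hxp⟩
      · rintro ⟨x, hx, hxe, hxp⟩
        rcases List.mem_cons.mp hx with rfl | hx
        · exact absurd hxe hi
        · exact ⟨x, hx, hxe, hxp⟩

theorem should_land_py_false (column : List String) :
    should_land_py column = false ↔ slpGap column := by
  unfold should_land_py
  by_cases hm : "   " ∈ column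
  · rw [if_neg (not_not_intro hm), slpOuter_false]
    constructor
    · rintro ⟨i, hi, hie, j, hj, hje⟩
      rw [PySem.List.mem_pyRange_one] at hi
      rw [PySem.List.mem_pyRange_neg_one] at hj
      simp only [PySem.List.len_eq] at hi
      have hjlen : j.toNat < column.length := by omega
      have hilen : i.toNat < column.length := by omega
      have hjlt : j < i := by
        rcases lt_or_eq_of_le hj.2 with hlt | hEq
        · exact hlt
        · exact absurd (hEq ▸ hie) hje
      refine ⟨i.toNat, j.toNat, by omega, hilen, ?_, ?_⟩
      · rw [PySem.List.pyGet?_eq_some_getElem column (show (0:Int) ≤ j by omega)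
          (lt_of_le_of_lt hj.2 hi.2)] at hje
        intro hcon
        apply hje
        rw [List.getD_eq_getElem _ _ hjlen] at hcon
        simp [hcon]
      · rw [PySem.List.pyGet?_eq_some_getElem column (show (0:Int) ≤ i by omega) hi.2] at hie
        rw [List.getD_eq_getElem _ _ hilen]
        simpa using hie
    · rintro ⟨i, j, hji, hi, hj, hie⟩
      refine ⟨(i : Int), ?_, ?_, (j : Int), ?_, ?_⟩
      · rw [PySem.List.mem_pyRange_one]
        simp only [PySem.List.len_eq]
        omega
      · rw [PySem.List.pyGet?_natCast, List.getElem?_eq_getElem hi]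
        rw [List.getD_eq_getElem _ _ hi] at hie
        simp [hie]
      · rw [PySem.List.mem_pyRange_neg_one]; omega
      · have hjlen : j < column.length := by omega
        rw [PySem.List.pyGet?_natCast, List.getElem?_eq_getElem hjlen]
        rw [List.getD_eq_getElem _ _ hjlen] at hj
        simpa using hj
  · rw [if_pos hm]
    constructor
    · intro h; simp at h
    · rintro ⟨i, j, _, hi, _, hie⟩
      exfalso
      apply hm
      rw [List.getD_eq_getElem _ _ hi] at hie
      exact hie ▸ List.getElem_mem hi

-- ===== VERDICT (by name: the statement is the Claim_ definition above) =====
theorem should_land_py_spec : Claim_equal_should_land_py := by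
  intro column _
  unfold Spec_should_land_py should_land_py_alt
  rcases ha : should_land_py column with _ | _
  · exact ((slpAltLoop_false column).mpr ((should_land_py_false column).mp ha)).symm
  · rcases hb : slpAltLoop column false with _ | _
    · exact absurd ((should_land_py_false column).mpr ((slpAltLoop_false column).mp hb))
        (by simp [ha])
    · rfl
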